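-- pv_equiv track=rewrite | github.com/vkvam/caddie | caddie/shape3d/loft.py | combine_lists2
-- ===== SOURCE A (Python) =====
-- def combine_lists2(other_lists):
--     # TODO: Attempt to link as many faces as possible.
--     # limit to the maximum sublist length
--     # with as few collisions as possible
--
--     combined = []
--     base_list = other_lists[0]
--     other_lists = other_lists[1:]
--     base_len = len(base_list)
--
--     for i, base_item in enumerate(base_list):
--         combined_group = [[base_item]]  # Start with a sublist containing the base item
--
--         for lst in other_lists:
--             lst_len = len(lst)
--
--             if lst_len >= base_len:
--                 # Group items from the larger list with the base item
--                 chunk_size = lst_len // base_len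
--                 combined_group.append(lst[i * chunk_size: (i + 1) * chunk_size])
--             else:
--                 # Repeat the item from the smaller list for each element in the base list
--                 combined_group.append([lst[i % lst_len]])
--
--         combined.append(combined_group)
--
--     return combined
-- ===== SOURCE B (Python) =====
-- def combine_lists2(other_lists):
--     # Column-then-transpose decomposition: build each other list's full column
--     # of contributions across all base indices, then assemble rows.
--     base_list = other_lists[0]
--     base_len = len(base_list)
--     if base_len == 0:
--         return []
--     columns = []
--     for lst in other_lists[1:]:
--         lst_len = len(lst)
--         if lst_len >= base_len:
--             chunk = lst_len // base_len
--             columns.append([lst[i * chunk:(i + 1) * chunk]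
--                             for i in range(base_len)])
--         else:
--             columns.append([[lst[i % lst_len]] for i in range(base_len)])
--     return [[[b]] + [col[i] for col in columns]
--             for i, b in enumerate(base_list)]
-- ===== Notes on version B (the rewrite author's own statement) =====
-- stated objective: alternative
-- what changed: B builds one full column of contributions per other list first (slice chunks or repeated item across all base indices) and then transposes, assembling each row from the base item and the i-th entry of every column, instead of A's row-major nested loop that recomputes lengths and chunk sizes per base index.
import Mathlib
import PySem

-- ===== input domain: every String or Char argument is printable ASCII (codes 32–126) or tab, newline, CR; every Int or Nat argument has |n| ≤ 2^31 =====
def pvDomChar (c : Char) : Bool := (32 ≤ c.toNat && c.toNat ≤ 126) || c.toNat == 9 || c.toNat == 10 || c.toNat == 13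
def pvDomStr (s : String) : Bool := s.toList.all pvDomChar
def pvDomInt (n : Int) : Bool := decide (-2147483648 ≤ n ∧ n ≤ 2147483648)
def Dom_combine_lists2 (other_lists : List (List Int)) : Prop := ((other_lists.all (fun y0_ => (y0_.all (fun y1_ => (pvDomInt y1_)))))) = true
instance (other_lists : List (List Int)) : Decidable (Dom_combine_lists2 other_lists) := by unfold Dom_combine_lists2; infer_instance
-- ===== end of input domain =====

-- B assembles each output row from per-list precomputed columns (column-then-transpose) instead of A's row-major nested loop; return values are identical on Pre_.

-- ===== PORT A =====
def combine_lists2 (other_lists : List (List Int)) : List (List (List Int)) :=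
  let base_list := (PySem.List.pyGet? other_lists 0).getD []   -- other_lists[0]; IndexError (none) excluded by Pre_
  let others := PySem.List.slice other_lists (some 1) none
  let base_len : Int := base_list.length
  (PySem.List.enumerate base_list).foldl (fun combined p =>
    let combined_group := others.foldl (fun g lst =>
      let lst_len : Int := lst.length
      if base_len ≤ lst_len then
        let chunk_size := PySem.Int.floordiv lst_len base_len
        g ++ [PySem.List.slice lst (some (p.1 * chunk_size)) (some ((p.1 + 1) * chunk_size))]
      else
        -- lst[i % lst_len]; ZeroDivisionError (lst = []) excluded by Pre_, index always in range
        g ++ [[PySem.List.pyGetD lst (PySem.Int.mod p.1 lst_len) 0]]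
      ) [[p.2]]
    combined ++ [combined_group]) []

-- ===== PORT B =====
def combine_lists2_alt (other_lists : List (List Int)) : List (List (List Int)) :=
  let base_list := (PySem.List.pyGet? other_lists 0).getD []   -- other_lists[0]; excluded by Pre_ when missing
  let base_len : Int := base_list.length
  if base_list.length = 0 then []
  else
    let columns := (PySem.List.slice other_lists (some 1) none).map (fun lst =>
      let lst_len : Int := lst.length
      if base_len ≤ lst_len then
        let chunk := PySem.Int.floordiv lst_len base_len
        (PySem.List.pyRange 0 base_len 1).map (fun i =>
          PySem.List.slice lst (some (i * chunk)) (some ((i + 1) * chunk)))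
      else
        (PySem.List.pyRange 0 base_len 1).map (fun i =>
          [PySem.List.pyGetD lst (PySem.Int.mod i lst_len) 0]))
    (PySem.List.enumerate base_list).map (fun p =>
      [[p.2]] ++ columns.map (fun col => PySem.List.pyGetD col p.1 []))

-- ===== PRECONDITION & SPEC =====
-- Pre_ excludes exactly the inputs where A raises: empty other_lists (IndexError on other_lists[0]),
-- and a nonempty base list together with an empty later list (ZeroDivisionError on i % 0).
def Pre_combine_lists2 (other_lists : List (List Int)) : Prop :=
  other_lists ≠ [] ∧ (other_lists.headD [] ≠ [] → ∀ lst ∈ other_lists.tail, lst ≠ [])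
instance (other_lists : List (List Int)) : Decidable (Pre_combine_lists2 other_lists) := by unfold Pre_combine_lists2; infer_instance
def pvWitness_combine_lists2 : List (List Int) := [[1, 2], [3, 4, 5], [6]]
def Spec_combine_lists2 (other_lists : List (List Int)) (out : List (List (List Int))) : Prop := out = combine_lists2_alt other_lists
instance (other_lists : List (List Int)) (out : List (List (List Int))) : Decidable (Spec_combine_lists2 other_lists out) := by unfold Spec_combine_lists2; infer_instance

-- ===== CLAIM (what is proved, stated in full; the proofs are below) =====
def Claim_equal_combine_lists2 : Prop := ∀ (other_lists : List (List Int)), Dom_combine_lists2 other_lists → Pre_combine_lists2 other_lists → Spec_combine_lists2 other_lists (combine_lists2 other_lists)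

-- ===== LEMMAS AND PROOFS =====

theorem combine_lists2_eq (other_lists : List (List Int))
    (hpre : Pre_combine_lists2 other_lists) :
    combine_lists2 other_lists = combine_lists2_alt other_lists := by
  obtain ⟨hne, htail⟩ := hpre
  obtain ⟨h, t, rfl⟩ : ∃ h t, other_lists = h :: t := by
    cases other_lists with
    | nil => exact absurd rfl hne
    | cons h t => exact ⟨h, t, rfl⟩
  simp only [combine_lists2, combine_lists2_alt, PySem.List.pyGet?_zero_cons,
    Option.getD_some, PySem.List.slice_from_one, List.tail_cons]
  rcases hh : h with _ | ⟨a, as⟩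
  · -- base list empty
    simp [PySem.List.enumerate_nil]
  rw [← hh]
  have hb : ¬ h.length = 0 := by rw [hh]; simp
  · -- base list nonempty
    simp only [if_neg hb]
    rw [PySem.List.foldl_append_singleton_eq_map
      (f := fun p : Int × Int => t.foldl (fun g lst =>
        let lst_len : Int := lst.length
        if (h.length : Int) ≤ lst_len then
          let chunk_size := PySem.Int.floordiv lst_len (h.length : Int)
          g ++ [PySem.List.slice lst (some (p.1 * chunk_size)) (some ((p.1 + 1) * chunk_size))]
        else
          g ++ [[PySem.List.pyGetD lst (PySem.Int.mod p.1 lst_len) 0]]) [[p.2]])]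
    simp only [List.nil_append, List.map_map]
    refine List.map_congr_left ?_
    intro p hp
    obtain ⟨k, hk, rfl⟩ := (PySem.List.mem_enumerate_iff _ _ _).mp hp
    simp only [zero_add]
    -- inner loop of A as a map
    have hinner : ∀ (init : List (List Int)),
        t.foldl (fun g lst =>
          let lst_len : Int := lst.length
          if (h.length : Int) ≤ lst_len then
            let chunk_size := PySem.Int.floordiv lst_len (h.length : Int)
            g ++ [PySem.List.slice lst (some ((k : Int) * chunk_size)) (some (((k : Int) + 1) * chunk_size))]
          else
            g ++ [[PySem.List.pyGetD lst (PySem.Int.mod (k : Int) lst_len) 0]]) init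
        = init ++ t.map (fun lst =>
            if (h.length : Int) ≤ (lst.length : Int) then
              PySem.List.slice lst (some ((k : Int) * PySem.Int.floordiv (lst.length : Int) (h.length : Int)))
                (some (((k : Int) + 1) * PySem.Int.floordiv (lst.length : Int) (h.length : Int)))
            else
              [PySem.List.pyGetD lst (PySem.Int.mod (k : Int) (lst.length : Int)) 0]) := by
      intro init
      rw [← PySem.List.foldl_append_singleton_eq_map]
      apply PySem.List.foldl_congr_mem
      intro acc lst _
      by_cases hc : (h.length : Int) ≤ (lst.length : Int) <;> simp [hc]
    rw [hinner]
    congr 1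
    refine List.map_congr_left (fun lst hl => ?_)
    by_cases hc : (h.length : Int) ≤ (lst.length : Int)
    · simp only [Function.comp_apply, if_pos hc]
      rw [PySem.List.pyGetD_map_pyRange _ h.length k _ hk]
    · simp only [Function.comp_apply, if_neg hc]
      rw [PySem.List.pyGetD_map_pyRange _ h.length k _ hk]

-- ===== VERDICT (by name: the statement is the Claim_ definition above) =====
theorem combine_lists2_spec : Claim_equal_combine_lists2 := by
  intro ol _ hpre
  exact combine_lists2_eq ol hpre
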